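-- pv_equiv track=rewrite | github.com/xwiz/nametest | meaning.py | _detect_svo
-- ===== SOURCE A (Python) =====
-- def _detect_svo(
--     tokens: list[str],
--     known_verbs: set[str],
-- ) -> list[tuple[str | None, list[str]]]:
--     """
--     Heuristic SVO chunking without a parser.
--
--     Scan left-to-right.  When a known verb is found:
--       - everything to its left (up to the previous verb) = subject tokens
--       - everything to its right (until the next verb) = object tokens
--
--     Returns list of (verb | None, [object_tokens]).
--     "None" means tokens that precede the first verb (subject region).
--
--     Example:
--         ["antibiotics", "kill", "bacteria", "by", "disrupting", "cell", "walls"]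
--         → [(None, ["antibiotics"]),
--            ("kill", ["bacteria", "by"]),
--            ("disrupting", ["cell", "walls"])]
--     """
--     result: list[tuple[str | None, list[str]]] = []
--     current_verb: str | None = None
--     current_obj:  list[str]  = []
--
--     for tok in tokens:
--         if tok in known_verbs:
--             result.append((current_verb, current_obj))
--             current_verb = tok
--             current_obj  = []
--         else:
--             current_obj.append(tok)
--
--     result.append((current_verb, current_obj))
--     return result
-- ===== SOURCE B (Python) =====
-- def _detect_svo(
--     tokens: list[str],
--     known_verbs: set[str],
-- ) -> list[tuple[str | None, list[str]]]:
--     """Index-table-then-slice: locate verb positions first, then emit slices between boundaries."""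
--     verbs = [(i, t) for i, t in enumerate(tokens) if t in known_verbs]
--     starts = [i for i, _ in verbs]
--     ends = starts[1:] + [len(tokens)]
--     out: list[tuple[str | None, list[str]]] = [
--         (None, tokens[:starts[0]] if starts else tokens[:])
--     ]
--     for (p, v), e in zip(verbs, ends):
--         out.append((v, tokens[p + 1:e]))
--     return out
-- ===== Notes on version B (the rewrite author's own statement) =====
-- stated objective: alternative
-- what changed: Replaces A's single running-accumulator scan (current_verb/current_obj state mutated per token) with an index-table-then-slice decomposition: first compute the list of verb positions via enumerate+filter, then emit the leading slice and one tokens[p+1:end] slice per consecutive boundary pair.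
import Mathlib
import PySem

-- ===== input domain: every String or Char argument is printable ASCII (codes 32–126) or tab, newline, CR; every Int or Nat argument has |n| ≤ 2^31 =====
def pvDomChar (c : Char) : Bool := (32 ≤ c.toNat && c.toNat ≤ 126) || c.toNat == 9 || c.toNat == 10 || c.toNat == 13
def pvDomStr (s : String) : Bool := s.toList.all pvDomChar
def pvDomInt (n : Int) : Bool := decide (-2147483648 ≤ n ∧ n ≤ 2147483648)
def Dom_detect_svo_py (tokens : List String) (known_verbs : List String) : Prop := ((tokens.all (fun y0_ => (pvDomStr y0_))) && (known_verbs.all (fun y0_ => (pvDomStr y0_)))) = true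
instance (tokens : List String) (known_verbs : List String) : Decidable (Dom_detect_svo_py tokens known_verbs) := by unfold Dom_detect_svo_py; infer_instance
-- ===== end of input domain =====

-- B replaces A's running-accumulator scan by an index-table-then-slice decomposition
-- (compute the verb positions first, then slice between the boundaries); objective: alternative.

-- ===== PORT A =====
-- A's single left-to-right loop over `tokens` with state (result, current_verb, current_obj).
def detectA_go (known_verbs : List String) : List String → Option String → List String → List (Option String × List String)
  | [], current_verb, current_obj => [(current_verb, current_obj)]
  | tok :: ts, current_verb, current_obj =>
    if tok ∈ known_verbs then
      (current_verb, current_obj) :: detectA_go known_verbs ts (some tok) []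
    else
      detectA_go known_verbs ts current_verb (current_obj ++ [tok])

def detect_svo_py (tokens : List String) (known_verbs : List String) : List (Option String × List String) :=
  detectA_go known_verbs tokens none []

-- ===== PORT B =====
-- B: verbs = [(i, t) for i, t in enumerate(tokens) if t in known_verbs];
--    starts = [i for i, _ in verbs]; ends = starts[1:] + [len(tokens)];
--    out = [(None, tokens[:starts[0]] if starts else tokens[:])];
--    for (p, v), e in zip(verbs, ends): out.append((v, tokens[p+1:e]))
def detect_svo_py_alt (tokens : List String) (known_verbs : List String) : List (Option String × List String) :=
  let verbs : List (Int × String) := (PySem.List.enumerate tokens).filter (fun p => p.2 ∈ known_verbs)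
  let starts : List Int := verbs.map (fun p => p.1)
  let ends : List Int := PySem.List.slice starts (some 1) none ++ [(tokens.length : Int)]
  let out : List (Option String × List String) :=
    [(none, match starts with
            | s0 :: _ => PySem.List.slice tokens none (some s0)
            | [] => PySem.List.slice tokens none none)]
  (verbs.zip ends).foldl
    (fun out pe => out ++ [(some pe.1.2, PySem.List.slice tokens (some (pe.1.1 + 1)) (some pe.2))]) out

-- ===== PRECONDITION & SPEC =====
def Spec_detect_svo_py (tokens : List String) (known_verbs : List String) (out : List (Option String × List String)) : Prop := out = detect_svo_py_alt tokens known_verbs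
instance (tokens : List String) (known_verbs : List String) (out : List (Option String × List String)) : Decidable (Spec_detect_svo_py tokens known_verbs out) := by unfold Spec_detect_svo_py; infer_instance

-- ===== CLAIM (what is proved, stated in full; the proofs are below) =====
def Claim_equal_detect_svo_py : Prop := ∀ (tokens : List String) (known_verbs : List String), Dom_detect_svo_py tokens known_verbs → Spec_detect_svo_py tokens known_verbs (detect_svo_py tokens known_verbs)

-- ===== LEMMAS AND PROOFS =====

-- Canonical description of the grouping: (first verb-free segment, [(verb, following segment), …]).
def segs (kv : List String) : List String → List String × List (String × List String)
  | [] => ([], [])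
  | t :: ts =>
    let r := segs kv ts
    if t ∈ kv then ([], (t, r.1) :: r.2) else (t :: r.1, r.2)

-- first verb index, or `tot` if there is none
def headIdxD (F : List (Int × String)) (tot : Int) : Int :=
  match F with
  | [] => tot
  | p :: _ => p.1

-- the group list B's loop produces, as a map
def G (tokens : List String) (F : List (Int × String)) (tot : Int) : List (Option String × List String) :=
  (F.zip ((F.map (fun p => p.1)).tail ++ [tot])).map
    (fun pe => (some pe.1.2, PySem.List.slice tokens (some (pe.1.1 + 1)) (some pe.2)))

lemma A_go_eq (kv : List String) :
    ∀ (ts : List String) (cv : Option String) (co : List String),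
    detectA_go kv ts cv co
      = (cv, co ++ (segs kv ts).1) :: (segs kv ts).2.map (fun g => (some g.1, g.2)) := by
  intro ts
  induction ts with
  | nil => intro cv co; simp [detectA_go, segs]
  | cons t ts ih =>
    intro cv co
    by_cases h : t ∈ kv <;> simp [detectA_go, segs, h, ih]

lemma G_nil (tokens : List String) (tot : Int) : G tokens [] tot = [] := by
  simp [G]

lemma G_cons (tokens : List String) (p : Int × String) (F : List (Int × String)) (tot : Int) :
    G tokens (p :: F) tot
      = (some p.2, PySem.List.slice tokens (some (p.1 + 1)) (some (headIdxD F tot))) :: G tokens F tot := by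
  cases F <;> simp [G, headIdxD]

-- splitting one element off the front of a slice
lemma slice_cons_split (tokens r : List String) (t : String) (k : Nat) (e : Int)
    (hd : tokens.drop k = t :: r) (he : (k : Int) + 1 ≤ e) :
    PySem.List.slice tokens (some (k : Int)) (some e)
      = t :: PySem.List.slice tokens (some ((k : Int) + 1)) (some e) := by
  have he0 : (0 : Int) ≤ e := by omega
  have hke : e = ((e.toNat : Nat) : Int) := by omega
  rw [hke]
  have h1 : ((k : Int) + 1) = (((k + 1 : Nat) : Nat) : Int) := by push_cast; ring
  rw [h1, PySem.List.slice_natCast, PySem.List.slice_natCast, hd]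
  have hdr : tokens.drop (k + 1) = r := by
    rw [← List.tail_drop, hd, List.tail_cons]
  rw [hdr]
  have h2 : e.toNat - k = (e.toNat - (k + 1)) + 1 := by omega
  rw [h2]
  simp [List.take_succ_cons]

-- indices produced by enumerate from s are ≥ s
lemma headIdxD_ge (kv : List String) (rest : List String) (s : Nat) (tot : Int)
    (htot : (s : Int) ≤ tot) :
    (s : Int) ≤ headIdxD ((PySem.List.enumerate rest (s : Int)).filter (fun p => p.2 ∈ kv)) tot := by
  cases hF : (PySem.List.enumerate rest (s : Int)).filter (fun p => p.2 ∈ kv) with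
  | nil => simpa [headIdxD] using htot
  | cons p F =>
    have hp : p ∈ (PySem.List.enumerate rest (s : Int)).filter (fun p => p.2 ∈ kv) := by
      rw [hF]; exact List.mem_cons_self
    have hp' := List.mem_of_mem_filter hp
    rw [PySem.List.mem_enumerate_iff] at hp'
    obtain ⟨j, hj, hpj⟩ := hp'
    simp [headIdxD, hpj]

-- Main invariant: for any suffix `rest = tokens.drop k`, the slices taken between the
-- verb boundaries of `rest` (absolute indices into `tokens`) are exactly the segments of `rest`.
lemma main_inv (kv : List String) :
    ∀ (rest : List String) (k : Nat) (tokens : List String), tokens.drop k = rest →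
    PySem.List.slice tokens (some (k : Int))
        (some (headIdxD ((PySem.List.enumerate rest (k : Int)).filter (fun p => p.2 ∈ kv)) (tokens.length : Int)))
      = (segs kv rest).1
    ∧ G tokens ((PySem.List.enumerate rest (k : Int)).filter (fun p => p.2 ∈ kv)) (tokens.length : Int)
      = (segs kv rest).2.map (fun g => (some g.1, g.2)) := by
  intro rest
  induction rest with
  | nil =>
    intro k tokens hd
    refine ⟨?_, by simp [PySem.List.enumerate, G, segs]⟩
    simp only [PySem.List.enumerate, List.filter_nil, headIdxD]
    rw [PySem.List.slice_natCast]
    simp [segs, hd]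
  | cons t rest ih =>
    intro k tokens hd
    have hklt : k < tokens.length := by
      by_contra h
      have : tokens.drop k = [] := List.drop_eq_nil_iff.mpr (by omega)
      rw [hd] at this; simp at this
    have hdr : tokens.drop (k + 1) = rest := by
      rw [← List.tail_drop, hd, List.tail_cons]
    have ih' := ih (k + 1) tokens hdr
    have hcast : ((k : Int) + 1) = (((k + 1 : Nat)) : Int) := by push_cast; ring
    by_cases h : t ∈ kv
    · -- t is a verb: first segment empty, head group is (t, first segment of rest)
      have hF : (PySem.List.enumerate (t :: rest) (k : Int)).filter (fun p => p.2 ∈ kv)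
          = ((k : Int), t) :: (PySem.List.enumerate rest ((k : Int) + 1)).filter (fun p => p.2 ∈ kv) := by
        simp [PySem.List.enumerate_cons, h]
      constructor
      · rw [hF]
        simp only [headIdxD]
        rw [show ((k:Int)) = ((k : Nat) : Int) from rfl, PySem.List.slice_natCast]
        simp [segs, h]
      · rw [hF, G_cons]
        simp only [segs, h, if_pos]
        rw [hcast]
        rw [ih'.1, ih'.2]
        simp
    · -- t is not a verb: it extends the first segment
      have hF : (PySem.List.enumerate (t :: rest) (k : Int)).filter (fun p => p.2 ∈ kv)
          = (PySem.List.enumerate rest ((k : Int) + 1)).filter (fun p => p.2 ∈ kv) := by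
        simp [PySem.List.enumerate_cons, h]
      have hge : ((k : Int) + 1)
          ≤ headIdxD ((PySem.List.enumerate rest ((k : Int) + 1)).filter (fun p => p.2 ∈ kv)) (tokens.length : Int) := by
        rw [hcast]
        exact headIdxD_ge kv rest (k + 1) _ (by exact_mod_cast hklt)
      constructor
      · rw [hF]
        rw [slice_cons_split tokens rest t k _ hd hge]
        rw [hcast]
        rw [ih'.1]
        simp [segs, h]
      · rw [hF]
        rw [hcast]
        rw [ih'.2]
        simp [segs, h]

lemma alt_eq (tokens kv : List String) :
    detect_svo_py_alt tokens kv
      = (none, (segs kv tokens).1) :: (segs kv tokens).2.map (fun g => (some g.1, g.2)) := by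
  have h := main_inv kv tokens 0 tokens (by simp)
  unfold detect_svo_py_alt
  rw [PySem.List.foldl_append_singleton_eq_map]
  rw [PySem.List.slice_from_one]
  have hz : ((0 : Nat) : Int) = (0 : Int) := rfl
  rw [hz] at h
  cases hF : (PySem.List.enumerate tokens (0:Int)).filter (fun p => p.2 ∈ kv) with
  | nil =>
    rw [hF] at h
    obtain ⟨h1, h2⟩ := h
    simp only [headIdxD] at h1
    rw [PySem.List.slice_zero_start, PySem.List.slice_to_natCast] at h1
    simp only [G_nil] at h2
    simp [PySem.List.slice_none_none, ← h1, ← h2]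
  | cons p F =>
    rw [hF] at h
    have h1 := h.1
    have h2 := h.2
    simp only [headIdxD] at h1
    rw [PySem.List.slice_zero_start] at h1
    simp only [G] at h2
    simp [h1, ← h2]

-- ===== VERDICT (by name: the statement is the Claim_ definition above) =====
theorem detect_svo_py_spec : Claim_equal_detect_svo_py := by
  intro tokens kv _
  show detect_svo_py tokens kv = detect_svo_py_alt tokens kv
  rw [alt_eq, detect_svo_py, A_go_eq]
  simp
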